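-- pv_equiv track=rewrite | github.com/unabl4/codefights | snowflake_crafts/snowflake_crafts.py | snowflakeCrafts
-- ===== SOURCE A (Python) =====
-- def snowflakeCrafts(pattern):
--     # algorithm:
--     # step 1: unfold diagonally
--     # step 2: unfold left
--     # step 3: unfold down
--
--     # ---
--
--     n = len(pattern[0])
--     g = [[' ' for _ in range(n)] for _ in range(n)] # initial grid
--     for y in range(n):
--         for x in range(n-y):
--             g[y][x] = pattern[y][x]
--
--     # step 1: unfold diagonally
--     for y in range(1,n):
--         for x in range(n-y,n):
--             g[y][x] = g[n-x-1][n-y-1] # copy over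
--
--     # step 2: unfold left
--     # take last N-1 columns, flip vertically
--
--     for y in range(n): # row-wise
--         g[y] = g[y][:0:-1] + g[y]
--
--     # step 3: unfold down
--     g = g[:-1] + g[::-1]
--
--     return [''.join(r) for r in g]
-- ===== SOURCE B (Python) =====
-- def snowflakeCrafts(pattern):
--     # Direct coordinate mapping: for each final cell, fold back into the
--     # fundamental triangle of `pattern` and read the character once.
--     n = len(pattern[0])
--     m = 2 * n - 1
--     out = []
--     for Y in range(m):
--         y = min(Y, m - 1 - Y)  # pattern row 0 at top/bottom edges, row n-1 at the center
--         row = []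
--         for X in range(m):
--             x = n - 1 - X if X < n - 1 else X - (n - 1)  # mirror about the center column
--             row.append(pattern[y][x] if x + y < n else pattern[n - 1 - x][n - 1 - y])
--         out.append(''.join(row))
--     return out
-- ===== Notes on version B (the rewrite author's own statement) =====
-- stated objective: alternative
-- what changed: Replaces A's four successive grid-mutation passes (seed triangle, unfold diagonally, unfold left, unfold down) with a single direct coordinate-mapping loop that folds every final cell back into the fundamental triangle and reads the pattern once, never building or mutating an intermediate grid.
-- outside the precondition, e.g. on snowflakeCrafts(['ab']): A raises IndexError, B raises IndexError
import Mathlib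
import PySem

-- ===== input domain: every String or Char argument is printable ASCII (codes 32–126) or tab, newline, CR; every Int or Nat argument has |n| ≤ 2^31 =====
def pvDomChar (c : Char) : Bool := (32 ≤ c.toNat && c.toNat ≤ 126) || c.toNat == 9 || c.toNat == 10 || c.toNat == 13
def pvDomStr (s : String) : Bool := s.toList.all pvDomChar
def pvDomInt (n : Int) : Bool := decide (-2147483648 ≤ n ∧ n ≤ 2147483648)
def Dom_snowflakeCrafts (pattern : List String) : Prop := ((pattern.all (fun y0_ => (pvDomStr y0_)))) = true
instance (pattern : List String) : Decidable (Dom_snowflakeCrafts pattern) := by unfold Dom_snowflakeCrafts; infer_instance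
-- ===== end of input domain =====

-- B replaces A's four successive grid-mutation passes by one direct coordinate-mapping
-- loop over the final grid (objective: alternative, same O(n^2) cost).

-- ===== PORT A =====
-- pattern[y][x] read (always in range where A performs it, by Pre_)
def pvGet2 (p : List (List Char)) (y x : Nat) : Char := (p.getD y []).getD x ' '
-- g[y][x] = c  (indices always in range where A performs it)
def pvSet2 (g : List (List Char)) (y x : Nat) (c : Char) : List (List Char) :=
  g.set y ((g.getD y []).set x c)

def snowflakeCrafts (pattern : List String) : List String :=
  let p := pattern.map String.toList
  let n := (p.getD 0 []).length
  let g0 : List (List Char) := List.replicate n (List.replicate n ' ')   -- initial grid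
  -- seed the triangle: for y in range(n): for x in range(n-y): g[y][x] = pattern[y][x]
  let g1 := (List.range n).foldl
    (fun g y => (List.range (n - y)).foldl (fun g x => pvSet2 g y x (pvGet2 p y x)) g) g0
  -- step 1: for y in range(1,n): for x in range(n-y,n): g[y][x] = g[n-x-1][n-y-1]
  let g2 := (List.range' 1 (n - 1)).foldl
    (fun g y => (List.range' (n - y) y).foldl
      (fun g x => pvSet2 g y x (pvGet2 g (n - x - 1) (n - y - 1))) g) g1
  -- step 2: g[y] = g[y][:0:-1] + g[y]   (r[:0:-1] is exactly (r.drop 1).reverse)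
  let g3 := g2.map (fun r => (r.drop 1).reverse ++ r)
  -- step 3: g = g[:-1] + g[::-1]   (xs[:-1] is take (len-1); xs[::-1] is reverse)
  let g4 := g3.take (g3.length - 1) ++ g3.reverse
  g4.map (fun r => String.mk r)

-- ===== PORT B =====
def snowflakeCrafts_alt (pattern : List String) : List String :=
  let p := pattern.map String.toList
  let n := (p.getD 0 []).length
  let m := 2 * n - 1          -- Python 2*n-1; for n = 0 both range(-1) and range(0) are empty
  (List.range m).map (fun Y =>
    let y := min Y (m - 1 - Y)
    String.mk ((List.range m).map (fun X =>
      let x := if X < n - 1 then n - 1 - X else X - (n - 1)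
      if x + y < n then pvGet2 p y x else pvGet2 p (n - 1 - x) (n - 1 - y))))

-- ===== PRECONDITION & SPEC =====
-- Pre_: exactly the inputs where Python A returns normally: the pattern is non-empty and,
-- with n = len(pattern[0]), row y exists and has at least n-y characters for every y < n
-- (on all other inputs A raises IndexError).
def Pre_snowflakeCrafts (pattern : List String) : Prop :=
  pattern ≠ [] ∧ ∀ y, y < (pattern.headD "").length →
    y < pattern.length ∧ (pattern.headD "").length - y ≤ (pattern.getD y "").length
instance (pattern : List String) : Decidable (Pre_snowflakeCrafts pattern) := by
  unfold Pre_snowflakeCrafts; infer_instance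

def pvWitness_snowflakeCrafts : List String := ["ab", "c"]

def Spec_snowflakeCrafts (pattern : List String) (out : List String) : Prop := out = snowflakeCrafts_alt pattern
instance (pattern : List String) (out : List String) : Decidable (Spec_snowflakeCrafts pattern out) := by unfold Spec_snowflakeCrafts; infer_instance

-- ===== CLAIM (what is proved, stated in full; the proofs are below) =====
def Claim_equal_snowflakeCrafts : Prop := ∀ (pattern : List String), Dom_snowflakeCrafts pattern → Pre_snowflakeCrafts pattern → Spec_snowflakeCrafts pattern (snowflakeCrafts pattern)

-- ===== LEMMAS AND PROOFS =====

def mkGrid (n : Nat) (f : Nat → Nat → Char) : List (List Char) :=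
  (List.range n).map (fun i => (List.range n).map (f i))
def pvCore (p : List (List Char)) (n y x : Nat) : Char :=
  if x + y < n then pvGet2 p y x else pvGet2 p (n - 1 - x) (n - 1 - y)

theorem mkGrid_congr {n : Nat} {f f' : Nat → Nat → Char}
    (h : ∀ i, i < n → ∀ j, j < n → f i j = f' i j) : mkGrid n f = mkGrid n f' := by
  apply List.ext_getElem <;> simp [mkGrid]
  intro i hi j hj; exact h i hi j hj

theorem replicate_eq_mkGrid (n : Nat) :
    List.replicate n (List.replicate n ' ') = mkGrid n (fun _ _ => ' ') := by
  apply List.ext_getElem <;> simp [mkGrid]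

theorem pvGet2_mkGrid (n : Nat) (f : Nat → Nat → Char) (i j : Nat) :
    pvGet2 (mkGrid n f) i j = if i < n ∧ j < n then f i j else ' ' := by
  unfold pvGet2 mkGrid
  rcases Nat.lt_or_ge i n with hi | hi
  · rcases Nat.lt_or_ge j n with hj | hj
    · simp [List.getD, hi, hj]
    · simp [List.getD, hi, Nat.not_lt.mpr hj, hj]
  · simp [List.getD, Nat.not_lt.mpr hi, List.getElem?_eq_none, hi]

theorem pvSet2_mkGrid (n : Nat) (f : Nat → Nat → Char) (y x : Nat) (c : Char)
    (hy : y < n) (hx : x < n) :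
    pvSet2 (mkGrid n f) y x c = mkGrid n (fun i j => if i = y ∧ j = x then c else f i j) := by
  unfold pvSet2 mkGrid
  apply List.ext_getElem
  · simp
  · intro i hi hi'
    simp only [List.length_set, List.length_map, List.length_range] at hi
    by_cases h : i = y
    · subst h
      rw [List.getElem_set_self (by simpa using hy)]
      have h2 : (((List.range n).map (fun i => (List.range n).map (f i))).getD i []) =
          (List.range n).map (f i) := by
        simp [List.getD, List.getElem?_range, hy]
      rw [h2]
      apply List.ext_getElem
      · simp
      · intro j hj hj'
        simp only [List.length_set, List.length_map, List.length_range] at hj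
        by_cases hjx : j = x
        · subst hjx; rw [List.getElem_set_self (by simpa using hx)]; simp [hj]
        · rw [List.getElem_set_ne (by omega)]; simp [hj, hjx]
    · rw [List.getElem_set_ne (by omega)]
      simp [hi, h]

theorem step0_inner (p : List (List Char)) (n y : Nat) (f : Nat → Nat → Char) (hy : y < n) :
    ∀ j, j ≤ n →
      (List.range j).foldl (fun g x => pvSet2 g y x (pvGet2 p y x)) (mkGrid n f) =
        mkGrid n (fun i x => if i = y ∧ x < j then pvGet2 p y x else f i x) := by
  intro j hj
  induction j with
  | zero =>
    simp only [List.range_zero, List.foldl_nil]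
    exact mkGrid_congr (by intro i _ x _; simp)
  | succ j ih =>
    rw [List.range_succ, List.foldl_append, ih (by omega)]
    simp only [List.foldl_cons, List.foldl_nil]
    rw [pvSet2_mkGrid n _ y j _ hy (by omega)]
    apply mkGrid_congr
    intro i _ x _
    by_cases hiy : i = y
    · subst hiy
      by_cases hxj : x = j
      · subst hxj; simp
      · by_cases hxl : x < j
        · have h2 : x < j + 1 := by omega
          simp [hxj, hxl, h2]
        · have h2 : ¬ x < j + 1 := by omega
          simp [hxj, hxl, h2]
    · simp [hiy]

theorem step0_outer (p : List (List Char)) (n : Nat) :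
    ∀ k, k ≤ n →
      (List.range k).foldl
        (fun g y => (List.range (n - y)).foldl (fun g x => pvSet2 g y x (pvGet2 p y x)) g)
        (mkGrid n (fun _ _ => ' ')) =
        mkGrid n (fun i x => if i < k ∧ x < n - i then pvGet2 p i x else ' ') := by
  intro k hk
  induction k with
  | zero =>
    simp only [List.range_zero, List.foldl_nil]
    exact mkGrid_congr (by intro i _ x _; simp)
  | succ k ih =>
    rw [List.range_succ, List.foldl_append, ih (by omega)]
    simp only [List.foldl_cons, List.foldl_nil]
    rw [step0_inner p n k _ (by omega) (n - k) (by omega)]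
    apply mkGrid_congr
    intro i _ x _
    by_cases hik : i = k
    · subst hik
      by_cases hx : x < n - i
      · have h2 : ¬ i < i := by omega
        have h3 : i < i + 1 := by omega
        simp [hx, h2, h3]
      · have h2 : ¬ (i < i ∧ x < n - i) := by omega
        simp [hx, h2]
    · rw [if_neg (by omega : ¬(i = k ∧ x < n - k))]
      by_cases h3 : i < k ∧ x < n - i
      · rw [if_pos h3, if_pos (by omega : i < k + 1 ∧ x < n - i)]
      · rw [if_neg h3, if_neg (by omega : ¬(i < k + 1 ∧ x < n - i))]

def pvG1 (p : List (List Char)) (n i x : Nat) : Char :=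
  if x < n - i then pvGet2 p i x else ' '

def pvMid (p : List (List Char)) (n k0 i x : Nat) : Char :=
  if i < k0 then pvCore p n i x else pvG1 p n i x

theorem step1_inner (p : List (List Char)) (n y : Nat) (hy : 1 ≤ y) (hyn : y < n) :
    ∀ j, j ≤ y →
      (List.range' (n - y) j).foldl
        (fun g x => pvSet2 g y x (pvGet2 g (n - x - 1) (n - y - 1)))
        (mkGrid n (pvMid p n y)) =
        mkGrid n (fun i x =>
          if i = y ∧ n - y ≤ x ∧ x < n - y + j then pvCore p n i x else pvMid p n y i x) := by
  intro j hj
  induction j with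
  | zero =>
    simp only [List.range'_zero, List.foldl_nil]
    exact mkGrid_congr (by intro i _ x _; rw [if_neg (by omega)])
  | succ j ih =>
    rw [List.range'_concat, List.foldl_append, ih (by omega)]
    simp only [List.foldl_cons, List.foldl_nil, one_mul]
    have hx : n - y + j < n := by omega
    have hread :
        pvGet2 (mkGrid n (fun i x =>
          if i = y ∧ n - y ≤ x ∧ x < n - y + j then pvCore p n i x else pvMid p n y i x))
          (n - (n - y + j) - 1) (n - y - 1) = pvCore p n y (n - y + j) := by
      rw [pvGet2_mkGrid]
      have h1 : n - (n - y + j) - 1 < n := by omega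
      have h2 : n - y - 1 < n := by omega
      have hne : ¬(n - (n - y + j) - 1 = y ∧ n - y ≤ n - y - 1 ∧ n - y - 1 < n - y + j) := by
        omega
      rw [if_pos ⟨h1, h2⟩, if_neg hne]
      have hlt : n - (n - y + j) - 1 < y := by omega
      unfold pvMid pvG1 pvCore
      have hc1 : (n - y - 1) + (n - (n - y + j) - 1) < n := by omega
      have hc1' : n - y - 1 < n - (n - (n - y + j) - 1) := by omega
      have hc2 : ¬ ((n - y + j) + y < n) := by omega
      have e1 : n - 1 - (n - y + j) = n - (n - y + j) - 1 := by omega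
      have e2 : n - 1 - y = n - y - 1 := by omega
      simp [hlt, hc1, hc1', hc2, e1, e2]
    rw [hread, pvSet2_mkGrid n _ y (n - y + j) _ hyn hx]
    apply mkGrid_congr
    intro i _ x _
    by_cases h1 : i = y ∧ x = n - y + j
    · rw [if_pos h1, if_pos (by omega : i = y ∧ n - y ≤ x ∧ x < n - y + (j + 1))]
      rw [h1.1, h1.2]
    · rw [if_neg h1]
      by_cases h2 : i = y ∧ n - y ≤ x ∧ x < n - y + j
      · rw [if_pos h2, if_pos (by omega : i = y ∧ n - y ≤ x ∧ x < n - y + (j + 1))]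
      · rw [if_neg h2, if_neg (by omega : ¬(i = y ∧ n - y ≤ x ∧ x < n - y + (j + 1)))]

theorem step1_outer (p : List (List Char)) (n : Nat) :
    ∀ t, t ≤ n - 1 →
      (List.range' 1 t).foldl
        (fun g y => (List.range' (n - y) y).foldl
          (fun g x => pvSet2 g y x (pvGet2 g (n - x - 1) (n - y - 1))) g)
        (mkGrid n (pvG1 p n)) =
        mkGrid n (pvMid p n (t + 1)) := by
  intro t ht
  induction t with
  | zero =>
    simp only [List.range'_zero, List.foldl_nil]
    apply mkGrid_congr
    intro i hi x hx
    unfold pvMid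
    by_cases h0 : i < 1
    · have hi0 : i = 0 := by omega
      subst hi0
      unfold pvCore pvG1
      simp [h0, hx]
    · simp [h0]
  | succ t ih =>
    rw [List.range'_concat, List.foldl_append, ih (by omega)]
    simp only [List.foldl_cons, List.foldl_nil, one_mul]
    have e : t + 1 = 1 + t := by omega
    rw [e, step1_inner p n (1 + t) (by omega) (by omega) (1 + t) (le_refl _)]
    apply mkGrid_congr
    intro i hi x hx
    by_cases h1 : i = 1 + t ∧ n - (1 + t) ≤ x ∧ x < n - (1 + t) + (1 + t)
    · rw [if_pos h1]
      unfold pvMid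
      rw [if_pos (by omega : i < 1 + t + 1), h1.1]
    · rw [if_neg h1]
      unfold pvMid
      by_cases h2 : i < 1 + t
      · rw [if_pos h2, if_pos (by omega : i < 1 + t + 1)]
      · by_cases h3 : i = 1 + t
        · rw [if_neg h2, if_pos (by omega : i < 1 + t + 1)]
          unfold pvG1 pvCore
          rw [if_pos (by omega : x < n - i), if_pos (by omega : x + i < n)]
        · rw [if_neg h2, if_neg (by omega : ¬ i < 1 + t + 1)]

theorem grid_eq_core (p : List (List Char)) (n : Nat) :
    (List.range' 1 (n - 1)).foldl
      (fun g y => (List.range' (n - y) y).foldl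
        (fun g x => pvSet2 g y x (pvGet2 g (n - x - 1) (n - y - 1))) g)
      ((List.range n).foldl
        (fun g y => (List.range (n - y)).foldl (fun g x => pvSet2 g y x (pvGet2 p y x)) g)
        (List.replicate n (List.replicate n ' '))) =
      mkGrid n (pvCore p n) := by
  rw [replicate_eq_mkGrid, step0_outer p n n (le_refl n)]
  have h1 : mkGrid n (fun i x => if i < n ∧ x < n - i then pvGet2 p i x else ' ') =
      mkGrid n (pvG1 p n) := by
    apply mkGrid_congr
    intro i hi x _
    unfold pvG1
    by_cases h : x < n - i <;> simp [h, hi]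
  rw [h1, step1_outer p n (n - 1) (le_refl _)]
  apply mkGrid_congr
  intro i hi x hx
  unfold pvMid
  have h : i < n - 1 + 1 := by omega
  simp [h]


theorem row_unfold (p : List (List Char)) (n y0 : Nat) (hy : y0 < n) :
    (((List.range n).map (pvCore p n y0)).drop 1).reverse ++ (List.range n).map (pvCore p n y0) =
    (List.range (2 * n - 1)).map (fun X =>
      pvCore p n y0 (if X < n - 1 then n - 1 - X else X - (n - 1))) := by
  apply List.ext_getElem
  · simp; omega
  · intro X hX hX'
    simp only [List.length_append, List.length_reverse, List.length_drop, List.length_map,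
      List.length_range] at hX
    by_cases hc : X < n - 1
    · rw [List.getElem_append_left (by simp; omega)]
      rw [List.getElem_reverse, List.getElem_drop, List.getElem_map, List.getElem_range,
        List.getElem_map, List.getElem_range]
      simp only [List.length_drop, List.length_map, List.length_range]
      have e : 1 + (n - 1 - 1 - X) = n - 1 - X := by omega
      rw [e, if_pos hc]
    · rw [List.getElem_append_right (by simp; omega)]
      rw [List.getElem_map, List.getElem_range, List.getElem_map, List.getElem_range]
      simp only [List.length_reverse, List.length_drop, List.length_map, List.length_range]
      rw [if_neg hc]

theorem ports_eq (pattern : List String) :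
    snowflakeCrafts pattern = snowflakeCrafts_alt pattern := by
  simp only [snowflakeCrafts, snowflakeCrafts_alt]
  generalize pattern.map String.toList = p
  generalize (p.getD 0 []).length = n
  rw [grid_eq_core]
  rcases Nat.eq_zero_or_pos n with h0 | h1
  · subst h0
    simp [mkGrid]
  · apply List.ext_getElem
    · simp [mkGrid]; omega
    · intro Y hY hY'
      simp only [List.length_map, List.length_append, List.length_take, List.length_reverse,
        List.length_range, mkGrid] at hY hY' ⊢
      rw [List.getElem_map, List.getElem_map, List.getElem_range]
      refine congrArg String.mk ?_
      by_cases hc : Y < n - 1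
      · rw [List.getElem_append_left (by simp; omega), List.getElem_take,
          List.getElem_map, List.getElem_map, List.getElem_range]
        have hmin : min Y (2 * n - 1 - 1 - Y) = Y := by omega
        rw [hmin, row_unfold p n Y (by omega)]
        rfl
      · rw [List.getElem_append_right (by simp; omega)]
        rw [List.getElem_reverse, List.getElem_map, List.getElem_map, List.getElem_range]
        simp only [List.length_map, List.length_take, List.length_reverse, List.length_range]
        have hmin : min Y (2 * n - 1 - 1 - Y) = n - 1 - (Y - min (n - 1) n) := by omega
        rw [hmin, row_unfold p n _ (by omega)]
        rfl

-- ===== VERDICT (by name: the statement is the Claim_ definition above) =====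
theorem snowflakeCrafts_spec : Claim_equal_snowflakeCrafts := by
  intro pattern _ _
  unfold Spec_snowflakeCrafts
  exact ports_eq pattern
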